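-- pv_equiv track=rewrite | github.com/Alonevs/FantasyWorld_ScreamingArch | src/Infrastructure/DjangoFramework/persistence/utils.py | _parse_jid_hierarchy
-- ===== SOURCE A (Python) =====
-- def _parse_jid_hierarchy(jid: str) -> list:
--     """
--     Fragmenta el J-ID en niveles lógicos.
--
--     Args:
--         jid: Identificador jerárquico completo
--
--     Returns:
--         Lista de IDs parciales representando cada nivel
--     """
--     ids_to_fetch = []
--     current_len = 0
--     target_len = len(jid)
--
--     while current_len < target_len:
--         # Los primeros niveles son de 2 caracteres. El Nivel 16 es de 4.
--         step = 4 if current_len >= 30 else 2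
--         if current_len + step > target_len:
--             break
--
--         current_len += step
--         chunk_id = jid[:current_len]
--         ids_to_fetch.append(chunk_id)
--
--     return ids_to_fetch
-- ===== SOURCE B (Python) =====
-- def _parse_jid_hierarchy(jid: str) -> list:
--     """Two-stage variant: first cut the J-ID into disjoint level chunks
--     (fifteen 2-char chunks, then 4-char chunks, discarding an incomplete
--     tail), then rebuild the level IDs by accumulating chunk prefixes."""
--     chunks = []
--     rest = jid
--     while True:
--         size = 2 if len(chunks) < 15 else 4
--         if len(rest) < size:
--             break
--         chunks.append(rest[:size])
--         rest = rest[size:]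
--     out = []
--     prefix = ''
--     for c in chunks:
--         prefix = prefix + c
--         out.append(prefix)
--     return out
-- ===== Notes on version B (the rewrite author's own statement) =====
-- stated objective: alternative
-- what changed: Instead of repeatedly slicing ever-longer prefixes at a stepped index, B first splits the string once into disjoint level chunks (fifteen 2-char chunks then 4-char chunks, dropping an incomplete tail) and then produces the level IDs in a second pass that accumulates a running prefix over the chunks.
import Mathlib
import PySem

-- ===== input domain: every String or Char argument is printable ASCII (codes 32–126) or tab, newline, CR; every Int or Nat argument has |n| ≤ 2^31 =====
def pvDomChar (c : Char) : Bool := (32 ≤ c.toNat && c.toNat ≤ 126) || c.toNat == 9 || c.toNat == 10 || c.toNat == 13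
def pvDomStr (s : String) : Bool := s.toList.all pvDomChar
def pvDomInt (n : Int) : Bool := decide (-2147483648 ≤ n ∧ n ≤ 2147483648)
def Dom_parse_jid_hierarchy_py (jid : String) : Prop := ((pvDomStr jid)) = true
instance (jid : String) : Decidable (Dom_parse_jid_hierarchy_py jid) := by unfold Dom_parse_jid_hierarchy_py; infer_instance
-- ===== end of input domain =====

-- B splits the string once into disjoint level chunks and then accumulates chunk prefixes,
-- instead of A's index-stepping prefix slices; objective: alternative decomposition.

-- ===== PORT A =====
-- A's while-loop: state (current_len, accumulator); step 2 below 30 and 4 from 30, break before append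
def pvAuxA (cs : List Char) (target cur : Nat) (acc : List String) : List String :=
  if cur < target then
    let step := if 30 ≤ cur then 4 else 2
    if target < cur + step then acc
    else pvAuxA cs target (cur + step)
           (acc ++ [String.ofList (PySem.List.slice cs none (some ((cur + step : Nat) : Int)))])
  else acc
termination_by target - cur
decreasing_by split_ifs at * <;> omega

def parse_jid_hierarchy_py (jid : String) : List String :=
  pvAuxA jid.toList jid.toList.length 0 []

-- ===== PORT B =====
-- B's first pass: cut `rest` into chunks (rest[:size] / rest[size:] via PySem slices),
-- size 2 for the first 15 chunks, then 4, stopping at an incomplete chunk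
def pvSplit (rest : List Char) (chunks : List (List Char)) : List (List Char) :=
  let size : Nat := if chunks.length < 15 then 2 else 4
  if rest.length < size then chunks
  else pvSplit (PySem.List.slice rest (some (size : Int)) none)
               (chunks ++ [PySem.List.slice rest none (some (size : Int))])
termination_by rest.length
decreasing_by
  simp only [PySem.List.slice_from_natCast, List.length_drop]
  have hb : (2:Nat) ≤ if _h : chunks.length < 15 then 2 else 4 := by split <;> omega
  omega

-- B's second pass: accumulate a running prefix over the chunks
def parse_jid_hierarchy_py_alt (jid : String) : List String :=
  let chunks := pvSplit jid.toList []
  (chunks.foldl (fun (st : List Char × List String) c =>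
      (st.1 ++ c, st.2 ++ [String.ofList (st.1 ++ c)])) ([], [])).2

-- ===== PRECONDITION & SPEC =====
def Spec_parse_jid_hierarchy_py (jid : String) (out : List String) : Prop := out = parse_jid_hierarchy_py_alt jid
instance (jid : String) (out : List String) : Decidable (Spec_parse_jid_hierarchy_py jid out) := by unfold Spec_parse_jid_hierarchy_py; infer_instance

-- ===== CLAIM (what is proved, stated in full; the proofs are below) =====
def Claim_equal_parse_jid_hierarchy_py : Prop := ∀ (jid : String), Dom_parse_jid_hierarchy_py jid → Spec_parse_jid_hierarchy_py jid (parse_jid_hierarchy_py jid)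

-- ===== LEMMAS AND PROOFS =====

-- proof-side skeleton of A's loop: the list of cut lengths it produces
def pvLa (target cur : Nat) : List Nat :=
  if cur < target then
    let step := if 30 <= cur then 4 else 2
    if target < cur + step then [] else (cur + step) :: pvLa target (cur + step)
  else []
termination_by target - cur
decreasing_by split_ifs at * <;> omega

theorem pvAuxA_eq (cs : List Char) (target cur : Nat) (acc : List String) :
    pvAuxA cs target cur acc
      = acc ++ (pvLa target cur).map
          (fun (L : Nat) => String.ofList (PySem.List.slice cs none (some (L : Int)))) := by
  unfold pvAuxA pvLa
  by_cases hcur : cur < target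
  · simp only [if_pos hcur]
    by_cases h30 : 30 <= cur
    · simp only [if_pos h30]
      by_cases hbrk : target < cur + 4
      · simp [if_pos hbrk]
      · simp only [if_neg hbrk, pvAuxA_eq cs target (cur + 4), List.map_cons,
          List.append_assoc, List.singleton_append]
    · simp only [if_neg h30]
      by_cases hbrk : target < cur + 2
      · simp [if_pos hbrk]
      · simp only [if_neg hbrk, pvAuxA_eq cs target (cur + 2), List.map_cons,
          List.append_assoc, List.singleton_append]
  · simp [if_neg hcur]
termination_by target - cur
decreasing_by all_goals omega

-- proof-side skeleton of B's first pass: the chunks it appends, given that k chunks exist already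
def pvTail (rest : List Char) (k : Nat) : List (List Char) :=
  let size : Nat := if k < 15 then 2 else 4
  if rest.length < size then []
  else rest.take size :: pvTail (rest.drop size) (k + 1)
termination_by rest.length
decreasing_by
  simp only [List.length_drop]
  have hb : (2:Nat) ≤ if _h : k < 15 then 2 else 4 := by split <;> omega
  omega

theorem pvSplit_eq (rest : List Char) (chunks : List (List Char)) :
    pvSplit rest chunks = chunks ++ pvTail rest chunks.length := by
  unfold pvSplit pvTail
  by_cases h : rest.length < if chunks.length < 15 then 2 else 4
  · simp [h]
  · simp only [h, PySem.List.slice_from_natCast, PySem.List.slice_to_natCast]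
    rw [pvSplit_eq]
    simp
termination_by rest.length
decreasing_by
  simp only [List.length_drop]
  split_ifs at * <;> omega

-- the running-prefix scan performed by B's second pass
def pvScan (p : List Char) (chunks : List (List Char)) : List (List Char) :=
  match chunks with
  | [] => []
  | c :: cs => (p ++ c) :: pvScan (p ++ c) cs

theorem foldl_scan (chunks : List (List Char)) (p : List Char) (out : List String) :
    (chunks.foldl (fun (st : List Char × List String) c =>
        (st.1 ++ c, st.2 ++ [String.ofList (st.1 ++ c)])) (p, out)).2
      = out ++ (pvScan p chunks).map String.ofList := by
  induction chunks generalizing p out with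
  | nil => simp [pvScan]
  | cons c cs ih =>
    simp only [List.foldl_cons, pvScan, List.map_cons]
    rw [ih]
    simp

-- B's chunk scan produces exactly A's prefixes: invariant linking chunk count k and prefix length cur
theorem pvTail_scan (cs : List Char) (k cur : Nat) (hcur : cur ≤ cs.length)
    (hinv : (k < 15 ∧ cur = 2 * k) ∨ (15 ≤ k ∧ cur = 30 + 4 * (k - 15))) :
    pvScan (cs.take cur) (pvTail (cs.drop cur) k)
      = (pvLa cs.length cur).map (fun L => cs.take L) := by
  rw [pvTail.eq_def, pvLa.eq_def]
  rcases hinv with ⟨hk, hcur2⟩ | ⟨hk, hcur2⟩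
  · -- phase 1: k < 15 chunks, cur = 2k < 30, size = step = 2
    simp only [if_pos hk, List.length_drop, if_neg (show ¬ 30 ≤ cur by omega)]
    by_cases h2 : cs.length - cur < 2
    · rw [if_pos h2]
      have : ¬ (cur < cs.length ∧ ¬ cs.length < cur + 2) := by omega
      by_cases hc : cur < cs.length
      · rw [if_pos hc, if_pos (by omega)]; simp [pvScan]
      · rw [if_neg hc]; simp [pvScan]
    · rw [if_neg h2, if_pos (by omega), if_neg (by omega)]
      simp only [pvScan, List.map_cons, List.drop_drop]
      have ht : cs.take cur ++ (cs.drop cur).take 2 = cs.take (cur + 2) := by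
        rw [List.take_add]
      rw [ht,
        pvTail_scan cs (k + 1) (cur + 2) (by omega)
          (by rcases Nat.lt_or_ge (k+1) 15 with h|h
              · exact Or.inl ⟨h, by omega⟩
              · exact Or.inr ⟨h, by omega⟩)]
  · -- phase 2: k ≥ 15 chunks, cur ≥ 30, size = step = 4
    simp only [if_neg (show ¬ k < 15 by omega), List.length_drop,
      if_pos (show 30 ≤ cur by omega)]
    by_cases h4 : cs.length - cur < 4
    · rw [if_pos h4]
      by_cases hc : cur < cs.length
      · rw [if_pos hc, if_pos (by omega)]; simp [pvScan]
      · rw [if_neg hc]; simp [pvScan]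
    · rw [if_neg h4, if_pos (by omega), if_neg (by omega)]
      simp only [pvScan, List.map_cons, List.drop_drop]
      have ht : cs.take cur ++ (cs.drop cur).take 4 = cs.take (cur + 4) := by
        rw [List.take_add]
      rw [ht, pvTail_scan cs (k + 1) (cur + 4) (by omega) (Or.inr ⟨by omega, by omega⟩)]
termination_by cs.length - cur
decreasing_by all_goals omega

-- ===== VERDICT (by name: the statement is the Claim_ definition above) =====
theorem parse_jid_hierarchy_py_spec : Claim_equal_parse_jid_hierarchy_py := by
  intro jid _
  unfold Spec_parse_jid_hierarchy_py parse_jid_hierarchy_py parse_jid_hierarchy_py_alt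
  dsimp only
  rw [pvSplit_eq, pvAuxA_eq]
  simp only [List.length_nil, List.nil_append, foldl_scan]
  have h := pvTail_scan jid.toList 0 0 (by omega) (Or.inl ⟨by omega, by omega⟩)
  simp only [List.take_zero, List.drop_zero] at h
  rw [h, List.map_map]
  refine (List.map_congr_left fun L _ => ?_).symm
  simp [PySem.List.slice_to_natCast, Function.comp]
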